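-- pv_equiv track=rewrite | github.com/saross/trap-extraction | archive/infrastructure/scripts/standardise-walkers.py | normalise_separators
-- ===== SOURCE A (Python) =====
-- def normalise_separators(walker_string: str) -> str:
--     """
--     Normalise separators in a walker string to pipe format.
--
--     Handles mixed pipe/comma separators by:
--     1. Splitting on pipes first
--     2. Then splitting on commas within each part
--     3. Rejoining with space-pipe-space
--
--     Args:
--         walker_string: Original walker string with mixed separators
--
--     Returns:
--         Normalised string with consistent pipe separators
--     """
--     if not walker_string:
--         return ''
--
--     # First split on pipes
--     parts = walker_string.split('|')
--
--     # Then split each part on commas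
--     names = []
--     for part in parts:
--         # Split on comma and strip whitespace
--         subparts = [name.strip() for name in part.split(',')]
--         names.extend([n for n in subparts if n])
--
--     return ' | '.join(names)
-- ===== SOURCE B (Python) =====
-- def normalise_separators(walker_string: str) -> str:
--     """Single left-to-right scan: accumulate a token, flush on '|' or ','."""
--     names = []
--     cur = []
--     for ch in walker_string:
--         if ch == '|' or ch == ',':
--             name = ''.join(cur).strip()
--             if name:
--                 names.append(name)
--             cur = []
--         else:
--             cur.append(ch)
--     name = ''.join(cur).strip()
--     if name:
--         names.append(name)
--     return ' | '.join(names)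
-- ===== Notes on version B (the rewrite author's own statement) =====
-- stated objective: alternative
-- what changed: Replaced the two-level split (split on '|', then an inner comma split with extend) by a single left-to-right character scan that accumulates the current token and flushes it (stripped, if nonempty) at each pipe or comma delimiter.
import Mathlib
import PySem

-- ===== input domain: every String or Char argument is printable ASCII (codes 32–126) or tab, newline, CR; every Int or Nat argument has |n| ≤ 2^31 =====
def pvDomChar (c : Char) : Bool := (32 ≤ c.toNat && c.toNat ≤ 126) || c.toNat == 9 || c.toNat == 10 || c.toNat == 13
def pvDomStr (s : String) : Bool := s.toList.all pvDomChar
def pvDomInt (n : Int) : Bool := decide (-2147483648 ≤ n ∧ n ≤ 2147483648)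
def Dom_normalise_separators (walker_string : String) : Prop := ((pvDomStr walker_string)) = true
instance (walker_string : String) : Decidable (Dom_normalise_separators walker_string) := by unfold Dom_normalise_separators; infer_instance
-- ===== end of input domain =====

-- B replaces A's two-level split (pipes, then commas) by a single character scan
-- that flushes the accumulated, stripped token at each delimiter (objective: alternative).

-- ===== PORT A =====
def normalise_separators (walker_string : String) : String :=
  if walker_string = "" then "" else
    let parts := PySem.Chars.splitOn walker_string.toList ['|']
    let names := parts.foldl (fun names part =>
      let subparts := (PySem.Chars.splitOn part [',']).map PySem.Chars.strip
      names ++ subparts.filter (fun n => n ≠ [])) []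
    String.ofList (PySem.Chars.join " | ".toList names)

-- ===== PORT B =====
-- state: (names so far, current token's characters)
def nsAltStep (st : List (List Char) × List Char) (c : Char) : List (List Char) × List Char :=
  if c = '|' || c = ',' then
    let name := PySem.Chars.strip st.2
    (if name ≠ [] then st.1 ++ [name] else st.1, [])
  else (st.1, st.2 ++ [c])

def normalise_separators_alt (walker_string : String) : String :=
  let st := walker_string.toList.foldl nsAltStep ([], [])
  let name := PySem.Chars.strip st.2
  let names := if name ≠ [] then st.1 ++ [name] else st.1
  String.ofList (PySem.Chars.join " | ".toList names)

-- ===== PRECONDITION & SPEC =====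
def Spec_normalise_separators (walker_string : String) (out : String) : Prop := out = normalise_separators_alt walker_string
instance (walker_string : String) (out : String) : Decidable (Spec_normalise_separators walker_string out) := by unfold Spec_normalise_separators; infer_instance

-- ===== CLAIM (what is proved, stated in full; the proofs are below) =====
def Claim_equal_normalise_separators : Prop := ∀ (walker_string : String), Dom_normalise_separators walker_string → Spec_normalise_separators walker_string (normalise_separators walker_string)

-- ===== LEMMAS AND PROOFS =====

-- structural characterisation of splitOn on a single-character separator
def specSplit (d : Char) : List Char → List (List Char)
  | [] => [[]]
  | c :: cs => if c = d then [] :: specSplit d cs else (specSplit d cs).modifyHead (c :: ·)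

theorem specSplit_ne_nil (d : Char) (l : List Char) : specSplit d l ≠ [] := by
  induction l with
  | nil => simp [specSplit]
  | cons c cs ih =>
    simp only [specSplit]
    split
    · simp
    · cases h : specSplit d cs with
      | nil => exact absurd h ih
      | cons a b => simp [List.modifyHead]

theorem splitOn_go_spec (d : Char) : ∀ (fuel : Nat) (l cur : List Char) (hacc : List (List Char)),
    l.length < fuel →
    PySem.Chars.splitOn.go [d] fuel l cur hacc = hacc.reverse ++ (specSplit d l).modifyHead (cur.reverse ++ ·) := by
  intro fuel
  induction fuel with
  | zero => intro l cur hacc h; omega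
  | succ n ih =>
    intro l cur hacc h
    cases l with
    | nil => simp [PySem.Chars.splitOn.go, specSplit, List.modifyHead]
    | cons c rest =>
      rw [PySem.Chars.splitOn.go]
      by_cases hc : c = d
      · subst hc
        simp only [List.isPrefixOf, Bool.and_true, beq_self_eq_true, if_pos, specSplit,
          List.length_cons, List.drop_succ_cons, List.drop_zero, List.length_nil]
        rw [ih rest [] _ (by simpa using Nat.lt_of_succ_lt_succ h)]
        simp only [List.reverse_cons, List.reverse_nil, List.nil_append, List.append_assoc]
        cases hs : specSplit c rest with
        | nil => exact absurd hs (specSplit_ne_nil c rest)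
        | cons a b => simp [List.modifyHead]
      · have hpre : [d].isPrefixOf (c :: rest) = false := by
          simp [List.isPrefixOf]
          exact fun hh => absurd hh.symm hc
        rw [hpre]
        simp only [Bool.false_eq_true, if_false]
        rw [ih rest (c :: cur) hacc (by simpa using Nat.lt_of_succ_lt_succ h)]
        simp only [specSplit, if_neg hc, List.reverse_cons]
        cases hs : specSplit d rest with
        | nil => exact absurd hs (specSplit_ne_nil d rest)
        | cons a b => simp [List.modifyHead]

theorem splitOn_eq_specSplit (d : Char) (l : List Char) :
    PySem.Chars.splitOn l [d] = specSplit d l := by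
  unfold PySem.Chars.splitOn
  rw [splitOn_go_spec d (l.length + 1) l [] [] (by omega)]
  simp only [List.reverse_nil, List.nil_append]
  cases hs : specSplit d l with
  | nil => exact absurd hs (specSplit_ne_nil d l)
  | cons a b => simp [List.modifyHead]

-- tokens when splitting on either delimiter
def tok : List Char → List (List Char)
  | [] => [[]]
  | c :: cs => if c = '|' ∨ c = ',' then [] :: tok cs else (tok cs).modifyHead (c :: ·)

def flushL (t : List Char) : List (List Char) :=
  if PySem.Chars.strip t ≠ [] then [PySem.Chars.strip t] else []

theorem tok_ne_nil (l : List Char) : tok l ≠ [] := by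
  induction l with
  | nil => simp [tok]
  | cons c cs ih =>
    simp only [tok]
    split
    · simp
    · cases h : tok cs with
      | nil => exact absurd h ih
      | cons a b => simp [List.modifyHead]

theorem specSplit_flatMap_tok (l : List Char) :
    (specSplit '|' l).flatMap (specSplit ',') = tok l := by
  induction l with
  | nil => simp [specSplit, tok]
  | cons c cs ih =>
    by_cases h1 : c = '|'
    · subst h1
      simp [specSplit, tok, ih, List.flatMap_cons]
    · cases hs : specSplit '|' cs with
      | nil => exact absurd hs (specSplit_ne_nil '|' cs)
      | cons a b =>
        rw [hs] at ih
        simp only [List.flatMap_cons] at ih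
        by_cases h2 : c = ','
        · subst h2
          simp only [specSplit, if_neg h1, hs, List.modifyHead, List.flatMap_cons, tok]
          rw [← ih]
          simp
        · have h3 : ¬ (c = '|' ∨ c = ',') := by tauto
          simp only [specSplit, if_neg h1, if_neg h2, if_neg h3, hs, List.modifyHead,
            List.flatMap_cons, tok]
          rw [← ih]
          cases hs2 : specSplit ',' a with
          | nil => exact absurd hs2 (specSplit_ne_nil ',' a)
          | cons x y => simp

theorem filter_strip_eq_flatMap (ps : List (List Char)) :
    (ps.map PySem.Chars.strip).filter (fun n => n ≠ []) = ps.flatMap flushL := by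
  induction ps with
  | nil => simp
  | cons p t ih =>
    simp only [List.map_cons, List.filter_cons, List.flatMap_cons, flushL]
    split_ifs with h h2 h3 <;> simp_all

theorem foldl_append_flatMap (f : List Char → List (List Char)) :
    ∀ (ps : List (List Char)) (ns : List (List Char)),
    ps.foldl (fun ns p => ns ++ f p) ns = ns ++ ps.flatMap f := by
  intro ps
  induction ps with
  | nil => simp
  | cons p t ih => intro ns; simp [List.foldl_cons, ih]

theorem flatMap_flatMap_assoc (l : List (List Char)) (f g : List Char → List (List Char)) :
    (l.flatMap f).flatMap g = l.flatMap (fun x => (f x).flatMap g) := by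
  induction l with
  | nil => simp
  | cons a t ih => simp [List.flatMap_cons, ih]

-- B\'s scan, as a direct recursion over the characters
def gScan : List Char → List Char → List (List Char)
  | cur, [] => flushL cur
  | cur, c :: cs => if c = '|' ∨ c = ',' then flushL cur ++ gScan [] cs else gScan (cur ++ [c]) cs

theorem gScan_eq (l : List Char) : ∀ cur,
    gScan cur l = ((tok l).modifyHead (cur ++ ·)).flatMap flushL := by
  induction l with
  | nil => intro cur; simp [gScan, tok, List.modifyHead]
  | cons c cs ih =>
    intro cur
    by_cases h : c = '|' ∨ c = ','
    · simp only [gScan, if_pos h, tok, List.modifyHead, List.flatMap_cons, ih []]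
      cases hs : tok cs with
      | nil => exact absurd hs (tok_ne_nil cs)
      | cons a b => simp [List.modifyHead]
    · simp only [gScan, if_neg h, tok, ih (cur ++ [c])]
      cases hs : tok cs with
      | nil => exact absurd hs (tok_ne_nil cs)
      | cons a b => simp

theorem foldl_nsAltStep (l : List Char) : ∀ (names : List (List Char)) (cur : List Char),
    (if PySem.Chars.strip (l.foldl nsAltStep (names, cur)).2 ≠ []
      then (l.foldl nsAltStep (names, cur)).1 ++ [PySem.Chars.strip (l.foldl nsAltStep (names, cur)).2]
      else (l.foldl nsAltStep (names, cur)).1)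
    = names ++ gScan cur l := by
  induction l with
  | nil =>
    intro names cur
    simp only [List.foldl_nil, gScan, flushL]
    split_ifs <;> simp
  | cons c cs ih =>
    intro names cur
    by_cases h : c = '|' ∨ c = ','
    · have hb : (c = '|' || c = ',') = true := by
        rcases h with h | h <;> simp [h]
      simp only [List.foldl_cons, nsAltStep, hb, if_true]
      rw [ih _ []]
      simp only [gScan, if_pos h, flushL]
      split_ifs <;> simp
    · have hb : (c = '|' || c = ',') = false := by
        simp only [not_or] at h
        simp [h.1, h.2]
      simp only [List.foldl_cons, nsAltStep, hb, Bool.false_eq_true, if_false, gScan, if_neg h]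
      exact ih names (cur ++ [c])

theorem names_eq (l : List Char) :
    (PySem.Chars.splitOn l ['|']).foldl (fun names part =>
      names ++ ((PySem.Chars.splitOn part [',']).map PySem.Chars.strip).filter (fun n => n ≠ [])) []
    = (if PySem.Chars.strip (l.foldl nsAltStep ([], [])).2 ≠ []
        then (l.foldl nsAltStep ([], [])).1 ++ [PySem.Chars.strip (l.foldl nsAltStep ([], [])).2]
        else (l.foldl nsAltStep ([], [])).1) := by
  rw [foldl_nsAltStep l [] []]
  have hA : (fun part => ((PySem.Chars.splitOn part [',']).map PySem.Chars.strip).filter (fun n => n ≠ []))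
      = (fun part => (specSplit ',' part).flatMap flushL) := by
    funext part
    rw [splitOn_eq_specSplit, filter_strip_eq_flatMap]
  calc (PySem.Chars.splitOn l ['|']).foldl (fun names part =>
      names ++ ((PySem.Chars.splitOn part [',']).map PySem.Chars.strip).filter (fun n => n ≠ [])) []
      = (specSplit '|' l).flatMap (fun part => (specSplit ',' part).flatMap flushL) := by
        rw [splitOn_eq_specSplit,
          foldl_append_flatMap (fun part => ((PySem.Chars.splitOn part [',']).map PySem.Chars.strip).filter (fun n => n ≠ [])) (specSplit '|' l) [],
          List.nil_append, hA]
    _ = ((specSplit '|' l).flatMap (specSplit ',')).flatMap flushL := by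
        rw [flatMap_flatMap_assoc]
    _ = (tok l).flatMap flushL := by rw [specSplit_flatMap_tok]
    _ = gScan [] l := by
        rw [gScan_eq l []]
        cases hs : tok l with
        | nil => exact absurd hs (tok_ne_nil l)
        | cons a b => simp [List.modifyHead]
    _ = [] ++ gScan [] l := by simp

-- ===== VERDICT (by name: the statement is the Claim_ definition above) =====
theorem normalise_separators_spec : Claim_equal_normalise_separators := by
  intro s _
  unfold Spec_normalise_separators normalise_separators normalise_separators_alt
  by_cases hs : s = ""
  · subst hs
    rw [if_pos rfl]
    decide
  · rw [if_neg hs]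
    simp only []
    rw [names_eq s.toList]
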